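-- pv_equiv track=rewrite | github.com/hoyack/archon72 | src/infrastructure/adapters/external/secretary_crewai_adapter.py | _reconcile_merge_groups
-- ===== SOURCE A (Python) =====
-- def _reconcile_merge_groups(
--
--     groups: list[list[int]],
--     total_count: int,
-- ) -> list[list[int]]:
--     """Reconcile overlapping merge groups using union-find."""
--     # Union-find structure
--     parent = list(range(total_count))
--
--     def find(x: int) -> int:
--         if parent[x] != x:
--             parent[x] = find(parent[x])
--         return parent[x]
--
--     def union(x: int, y: int) -> None:
--         px, py = find(x), find(y)
--         if px != py:
--             parent[px] = py
--
--     # Union all indices in each group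
--     for group in groups:
--         if len(group) > 1:
--             for i in range(1, len(group)):
--                 union(group[0], group[i])
--
--     # Collect final groups
--     group_map: dict[int, list[int]] = {}
--     for i in range(total_count):
--         root = find(i)
--         if root not in group_map:
--             group_map[root] = []
--         group_map[root].append(i)
--
--     return list(group_map.values())
-- ===== SOURCE B (Python) =====
-- def _reconcile_merge_groups(
--     groups: list[list[int]],
--     total_count: int,
-- ) -> list[list[int]]:
--     """Reconcile overlapping merge groups by whole-array label propagation."""
--     # One label per index; merging two classes rewrites one label into the other.
--     label = list(range(total_count))
--     for group in groups:
--         if len(group) > 1: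
--             for x in group[1:]:
--                 a, b = label[group[0]], label[x]
--                 if a != b:
--                     label = [b if l == a else l for l in label]
--     # Group indices by final label, in first-appearance order.
--     out: dict[int, list[int]] = {}
--     for i, l in enumerate(label):
--         out.setdefault(l, []).append(i)
--     return list(out.values())
-- ===== Notes on version B (the rewrite author's own statement) =====
-- stated objective: alternative
-- what changed: A's recursive union-find with path compression (mutable parent array, nested find/union) is replaced by whole-array label propagation: every index carries a class label and each merge rewrites one label into the other in a single comprehension, so the final grouping is one enumerate pass with no pointer chasing.
import Mathlib
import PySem

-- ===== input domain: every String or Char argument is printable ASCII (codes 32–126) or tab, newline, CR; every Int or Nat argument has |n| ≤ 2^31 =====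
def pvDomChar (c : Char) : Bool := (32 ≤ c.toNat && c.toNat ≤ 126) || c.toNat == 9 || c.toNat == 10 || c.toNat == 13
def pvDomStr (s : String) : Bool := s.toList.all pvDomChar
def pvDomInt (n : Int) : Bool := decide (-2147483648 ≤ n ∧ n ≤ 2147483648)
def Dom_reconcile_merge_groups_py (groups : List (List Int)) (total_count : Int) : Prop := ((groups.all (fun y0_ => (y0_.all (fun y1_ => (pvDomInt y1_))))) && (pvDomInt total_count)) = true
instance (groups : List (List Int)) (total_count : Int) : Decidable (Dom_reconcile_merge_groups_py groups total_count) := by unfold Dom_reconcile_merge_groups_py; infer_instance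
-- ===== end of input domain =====

-- ===== PORT A =====
-- One honest line: B replaces A's recursive union-find (with path compression) by
-- whole-array label propagation; objective: alternative (structurally different, similar cost).
-- A's nested `find` mutates `parent`; ported as state-passing recursion with fuel
-- `parent.length + 1` (a totality guard only: on the inputs Pre_ admits the Python
-- recursion always terminates within the chain length).
def pvFindA : Nat → List Int → Int → List Int × Int
  | 0, parent, x => (parent, x)
  | f+1, parent, x =>
    match PySem.List.pyGet? parent x with
    | none => (parent, x)        -- IndexError in Python: outside Pre_
    | some p =>
      if p ≠ x then
        let pr := pvFindA f parent p
        (PySem.List.pySetD pr.1 x pr.2, pr.2)   -- parent[x] = find(parent[x]); return parent[x]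
      else (parent, x)

def pvUnionA (parent : List Int) (x y : Int) : List Int :=
  let fx := pvFindA (parent.length + 1) parent x
  let fy := pvFindA (fx.1.length + 1) fx.1 y
  if fx.2 ≠ fy.2 then PySem.List.pySetD fy.1 fx.2 fy.2 else fy.1

def pvGroupStepA (parent : List Int) (g : List Int) : List Int :=
  if 1 < PySem.List.len g then
    (PySem.List.pyRange 1 (PySem.List.len g) 1).foldl
      (fun par i => pvUnionA par (PySem.List.pyGetD g 0 0) (PySem.List.pyGetD g i 0)) parent
  else parent

def pvCollectStepA (st : PySem.Dict Int (List Int) × List Int) (i : Int) :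
    PySem.Dict Int (List Int) × List Int :=
  let fr := pvFindA (st.2.length + 1) st.2 i
  let d := if st.1.contains fr.2 then st.1 else st.1.insert fr.2 []
  (d.modify fr.2 [] (· ++ [i]), fr.1)

def reconcile_merge_groups_py (groups : List (List Int)) (total_count : Int) : List (List Int) :=
  let parent := PySem.List.pyRange 0 total_count 1
  let parent := groups.foldl pvGroupStepA parent
  let st := (PySem.List.pyRange 0 total_count 1).foldl pvCollectStepA (PySem.Dict.empty, parent)
  st.1.values

-- ===== PORT B =====
def pvRelabelStepB (label : List Int) (g : List Int) : List Int :=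
  if 1 < PySem.List.len g then
    (PySem.List.slice g (some 1) none).foldl
      (fun label x =>
        let a := PySem.List.pyGetD label (PySem.List.pyGetD g 0 0) 0
        let b := PySem.List.pyGetD label x 0
        if a ≠ b then label.map (fun l => if l = a then b else l) else label) label
  else label

def reconcile_merge_groups_py_alt (groups : List (List Int)) (total_count : Int) : List (List Int) :=
  let label := PySem.List.pyRange 0 total_count 1
  let label := groups.foldl pvRelabelStepB label
  let out := (PySem.List.enumerate label 0).foldl
    (fun (d : PySem.Dict Int (List Int)) (p : Int × Int) =>
      (d.setdefault p.2 []).modify p.2 [] (· ++ [p.1])) PySem.Dict.empty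
  out.values

-- ===== PRECONDITION & SPEC =====
-- Pre_ excludes exactly the inputs where the Python A raises (IndexError): some merge
-- group of length > 1 contains an index outside [-total_count, total_count).
def Pre_reconcile_merge_groups_py (groups : List (List Int)) (total_count : Int) : Prop :=
  ∀ g ∈ groups, 1 < g.length → ∀ x ∈ g, -total_count ≤ x ∧ x < total_count
instance (groups : List (List Int)) (total_count : Int) : Decidable (Pre_reconcile_merge_groups_py groups total_count) := by unfold Pre_reconcile_merge_groups_py; infer_instance
def pvWitness_reconcile_merge_groups_py : List (List Int) × Int := ([[0, 1], [1, 2]], 4)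

def Spec_reconcile_merge_groups_py (groups : List (List Int)) (total_count : Int) (out : List (List Int)) : Prop := out = reconcile_merge_groups_py_alt groups total_count
instance (groups : List (List Int)) (total_count : Int) (out : List (List Int)) : Decidable (Spec_reconcile_merge_groups_py groups total_count out) := by unfold Spec_reconcile_merge_groups_py; infer_instance

-- ===== CLAIM (what is proved, stated in full; the proofs are below) =====
def Claim_equal_reconcile_merge_groups_py : Prop := ∀ (groups : List (List Int)) (total_count : Int), Dom_reconcile_merge_groups_py groups total_count → Pre_reconcile_merge_groups_py groups total_count → Spec_reconcile_merge_groups_py groups total_count (reconcile_merge_groups_py groups total_count)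


-- ===== LEMMAS AND PROOFS =====

-- Proof-side view of A's parent array: one pointer step, iterated chasing, roots.
def pstep (par : List Int) (x : Int) : Int := PySem.List.pyGetD par x x

def chase (par : List Int) : Nat → Int → Int
  | 0, x => x
  | k+1, x => chase par k (pstep par x)

def IsRootP (par : List Int) (x : Int) : Prop := pstep par x = x

def InRangeL (par : List Int) : Prop := ∀ p ∈ par, 0 ≤ p ∧ p < (par.length : Int)

def rcount (par : List Int) : Nat :=
  ∑ i ∈ Finset.range par.length, if pstep par (i : Int) = (i : Int) then 1 else 0

def GoodP (par : List Int) : Prop :=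
  InRangeL par ∧ ∀ x : Int, 0 ≤ x → x < (par.length : Int) →
    ∃ k, IsRootP par (chase par k x) ∧ k + rcount par ≤ par.length

def rootP (par : List Int) (x : Int) : Int := chase par par.length x

-- B's labels and the shared grouping loop.
def lget (label : List Int) (x : Int) : Int := PySem.List.pyGetD label x 0

def gstep (key : Int → Int) (d : PySem.Dict Int (List Int)) (i : Int) : PySem.Dict Int (List Int) :=
  (if d.contains (key i) then d else d.insert (key i) []).modify (key i) [] (· ++ [i])

def LinkInv (n : Nat) (par label : List Int) : Prop :=
  par.length = n ∧ label.length = n ∧ GoodP par ∧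
  ∀ i j : Int, 0 ≤ i → i < (n : Int) → 0 ≤ j → j < (n : Int) →
    (rootP par i = rootP par j ↔ lget label i = lget label j)

def classMem (k1 : Int → Int) (m : Nat) (r : Int) : List Int :=
  (PySem.List.pyRange 0 (m : Int) 1).filter (fun j => k1 j == k1 r)

def GInv (k1 k2 : Int → Int) (m : Nat) (d1 d2 : PySem.Dict Int (List Int)) (reps : List Int) : Prop :=
  (∀ r ∈ reps, 0 ≤ r ∧ r < (m : Int)) ∧ (reps.map k1).Nodup ∧ (reps.map k2).Nodup ∧
  (∀ j : Int, 0 ≤ j → j < (m : Int) → ∃ r ∈ reps, k1 r = k1 j) ∧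
  d1.items = reps.map (fun r => (k1 r, classMem k1 m r)) ∧
  d2.items = reps.map (fun r => (k2 r, classMem k1 m r))

lemma pstep_eq (par : List Int) (x : Int) (h0 : 0 ≤ x) (h1 : x < (par.length : Int)) :
    pstep par x = par[x.toNat]'(by omega) := by
  simp [pstep, PySem.List.pyGetD_eq_getElem par x h0 h1]


lemma pstep_range (par : List Int) (hR : InRangeL par) (x : Int) (h0 : 0 ≤ x)
    (h1 : x < (par.length : Int)) : 0 ≤ pstep par x ∧ pstep par x < (par.length : Int) := by
  have h := pstep_eq par x h0 h1
  have hm : par[x.toNat]'(by omega) ∈ par := List.getElem_mem _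
  rw [h]; exact hR _ hm


lemma chase_add (par : List Int) (a b : Nat) (x : Int) :
    chase par (a + b) x = chase par b (chase par a x) := by
  induction a generalizing x with
  | zero => simp [chase]
  | succ a ih =>
    have : a + 1 + b = (a + b) + 1 := by omega
    rw [this]
    show chase par (a+b) (pstep par x) = chase par b (chase par a (pstep par x))
    exact ih _


lemma chase_fix (par : List Int) (k : Nat) (y : Int) (h : IsRootP par y) : chase par k y = y := by
  induction k with
  | zero => rfl
  | succ k ih => show chase par k (pstep par y) = y; rw [h]; exact ih


lemma chase_range (par : List Int) (hR : InRangeL par) (k : Nat) (x : Int) (h0 : 0 ≤ x)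
    (h1 : x < (par.length : Int)) : 0 ≤ chase par k x ∧ chase par k x < (par.length : Int) := by
  induction k generalizing x with
  | zero => exact ⟨h0, h1⟩
  | succ k ih =>
    have := pstep_range par hR x h0 h1
    exact ih _ this.1 this.2


lemma chase_stable (par : List Int) (k m : Nat) (x : Int) (h : IsRootP par (chase par k x))
    (hkm : k ≤ m) : chase par m x = chase par k x := by
  have : m = k + (m - k) := by omega
  rw [this, chase_add]
  exact chase_fix _ _ _ h


lemma chase_uniq (par : List Int) (k k' : Nat) (x : Int) (h : IsRootP par (chase par k x))
    (h' : IsRootP par (chase par k' x)) : chase par k x = chase par k' x := by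
  have h1 := chase_stable par k (max k k') x h (Nat.le_max_left _ _)
  have h2 := chase_stable par k' (max k k') x h' (Nat.le_max_right _ _)
  omega


lemma rootP_isRoot (par : List Int) (hG : GoodP par) (x : Int) (h0 : 0 ≤ x)
    (h1 : x < (par.length : Int)) : IsRootP par (rootP par x) := by
  obtain ⟨k, hk, hb⟩ := hG.2 x h0 h1
  have : rootP par x = chase par k x := chase_stable par k par.length x hk (by omega)
  rw [rootP] at *; rw [this]; exact hk


lemma rootP_eq_chase (par : List Int) (hG : GoodP par) (x : Int) (h0 : 0 ≤ x)
    (h1 : x < (par.length : Int)) (k : Nat) (h : IsRootP par (chase par k x)) :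
    rootP par x = chase par k x := by
  have := rootP_isRoot par hG x h0 h1
  exact chase_uniq par par.length k x this h


lemma rcount_pos (par : List Int) (hG : GoodP par) (x : Int) (h0 : 0 ≤ x)
    (h1 : x < (par.length : Int)) : 1 ≤ rcount par := by
  set z := rootP par x with hz
  have hr : IsRootP par z := rootP_isRoot par hG x h0 h1
  have hzr : 0 ≤ z ∧ z < (par.length : Int) := chase_range par hG.1 par.length x h0 h1
  have hmem : z.toNat ∈ Finset.range par.length := by
    simp only [Finset.mem_range]; omega
  have hone : (if pstep par ((z.toNat : Nat) : Int) = ((z.toNat : Nat) : Int) then 1 else 0) = 1 := by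
    have : ((z.toNat : Nat) : Int) = z := by omega
    rw [this, if_pos (by exact hr)]
  have hle := Finset.single_le_sum (s := Finset.range par.length)
    (f := fun i : Nat => if pstep par (i : Int) = (i : Int) then 1 else 0)
    (fun i _ => by positivity) hmem
  refine le_trans (le_of_eq ?_) hle
  exact hone.symm


lemma pstep_set (par : List Int) (j v z : Int) (hj0 : 0 ≤ j) (hj1 : j < (par.length : Int))
    (hz0 : 0 ≤ z) (hz1 : z < (par.length : Int)) :
    pstep (par.set j.toNat v) z = if z = j then v else pstep par z := by
  have hlen : (par.set j.toNat v).length = par.length := by simp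
  have hz1' : z < ((par.set j.toNat v).length : Int) := by rw [hlen]; exact hz1
  rw [pstep_eq _ _ hz0 hz1', pstep_eq _ _ hz0 hz1]
  rcases eq_or_ne z j with h | h
  · subst h
    rw [if_pos rfl]
    rw [List.getElem_set_self (by omega)]
  · rw [if_neg h]
    rw [List.getElem_set_ne (by omega)]


lemma InRangeL_set (par : List Int) (j v : Int) (hR : InRangeL par) (hv0 : 0 ≤ v)
    (hv1 : v < (par.length : Int)) : InRangeL (par.set j.toNat v) := by
  intro p hp
  have hlen : (par.set j.toNat v).length = par.length := by simp
  rw [hlen]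
  rcases List.mem_or_eq_of_mem_set hp with h | h
  · exact hR _ h
  · subst h; exact ⟨hv0, hv1⟩


lemma rcount_set_balance (par : List Int) (j v : Int) (hj0 : 0 ≤ j) (hj1 : j < (par.length : Int)) :
    rcount (par.set j.toNat v) + (if pstep par j = j then 1 else 0)
      = rcount par + (if pstep (par.set j.toNat v) j = j then 1 else 0) := by
  have hlen : (par.set j.toNat v).length = par.length := by simp
  have hmem : j.toNat ∈ Finset.range par.length := by simp only [Finset.mem_range]; omega
  have hcast : ((j.toNat : Nat) : Int) = j := by omega
  have e1 : rcount (par.set j.toNat v)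
      = (if pstep (par.set j.toNat v) j = j then 1 else 0)
        + ∑ i ∈ (Finset.range par.length).erase j.toNat,
            (if pstep (par.set j.toNat v) (i : Int) = (i : Int) then 1 else 0) := by
    rw [rcount, hlen, ← Finset.add_sum_erase _ _ hmem, hcast]
  have e2 : rcount par
      = (if pstep par j = j then 1 else 0)
        + ∑ i ∈ (Finset.range par.length).erase j.toNat,
            (if pstep par (i : Int) = (i : Int) then 1 else 0) := by
    rw [rcount, ← Finset.add_sum_erase _ _ hmem, hcast]
  have esum : ∑ i ∈ (Finset.range par.length).erase j.toNat,
      (if pstep (par.set j.toNat v) (i : Int) = (i : Int) then 1 else 0)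
      = ∑ i ∈ (Finset.range par.length).erase j.toNat,
          (if pstep par (i : Int) = (i : Int) then 1 else 0) := by
    apply Finset.sum_congr rfl
    intro i hi
    have hi' := Finset.mem_of_mem_erase hi
    have hne := Finset.ne_of_mem_erase hi
    simp only [Finset.mem_range] at hi'
    rw [pstep_set par j v (i : Int) hj0 hj1 (by positivity) (by exact_mod_cast hi')]
    rw [if_neg (show ¬((i : Int) = j) by omega)]
  rw [e1, e2, esum]
  split_ifs <;> omega

lemma link_chase (par : List Int) (px py : Int) (hR : InRangeL par)
    (hpx0 : 0 ≤ px) (hpx1 : px < (par.length : Int)) (hpy0 : 0 ≤ py) (hpy1 : py < (par.length : Int))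
    (hrx : IsRootP par px) (hry : IsRootP par py) (hne : px ≠ py) :
    ∀ k y, 0 ≤ y → y < (par.length : Int) → IsRootP par (chase par k y) →
      ∃ k' ≤ k + 1, chase (par.set px.toNat py) k' y
        = (if chase par k y = px then py else chase par k y)
        ∧ IsRootP (par.set px.toNat py) (chase (par.set px.toNat py) k' y) := by
  intro k
  induction k with
  | zero =>
    intro y hy0 hy1 hroot
    by_cases hcase : y = px
    · refine ⟨1, by omega, ?_, ?_⟩
      · show chase (par.set px.toNat py) 0 (pstep (par.set px.toNat py) y) = _
        rw [pstep_set par px py y hpx0 hpx1 hy0 hy1, if_pos hcase]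
        show py = if chase par 0 y = px then py else chase par 0 y
        rw [show chase par 0 y = y from rfl, if_pos hcase]
      · show IsRootP _ (chase (par.set px.toNat py) 0 (pstep (par.set px.toNat py) y))
        rw [pstep_set par px py y hpx0 hpx1 hy0 hy1, if_pos hcase]
        show pstep (par.set px.toNat py) py = py
        rw [pstep_set par px py py hpx0 hpx1 hpy0 hpy1, if_neg (fun h => hne h.symm)]
        exact hry
    · refine ⟨0, by omega, ?_, ?_⟩
      · show y = if chase par 0 y = px then py else chase par 0 y
        rw [show chase par 0 y = y from rfl, if_neg hcase]
      · show pstep (par.set px.toNat py) y = y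
        rw [pstep_set par px py y hpx0 hpx1 hy0 hy1, if_neg hcase]
        exact hroot
  | succ k ih =>
    intro y hy0 hy1 hroot
    by_cases hcase : y = px
    · subst hcase
      have hch : chase par (k+1) y = y := chase_fix par (k+1) y hrx
      refine ⟨1, by omega, ?_, ?_⟩
      · show chase (par.set y.toNat py) 0 (pstep (par.set y.toNat py) y) = _
        rw [pstep_set par y py y hpx0 hpx1 hy0 hy1, if_pos rfl]
        show py = if chase par (k+1) y = y then py else chase par (k+1) y
        rw [hch, if_pos rfl]
      · show IsRootP _ (chase (par.set y.toNat py) 0 (pstep (par.set y.toNat py) y))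
        rw [pstep_set par y py y hpx0 hpx1 hy0 hy1, if_pos rfl]
        show pstep (par.set y.toNat py) py = py
        rw [pstep_set par y py py hpx0 hpx1 hpy0 hpy1, if_neg (fun h => hne h.symm)]
        exact hry
    · have hp := pstep_range par hR y hy0 hy1
      have hroot' : IsRootP par (chase par k (pstep par y)) := hroot
      obtain ⟨k', hk', hval, hisr⟩ := ih (pstep par y) hp.1 hp.2 hroot'
      refine ⟨k' + 1, by omega, ?_, ?_⟩
      · show chase (par.set px.toNat py) k' (pstep (par.set px.toNat py) y) = _
        rw [pstep_set par px py y hpx0 hpx1 hy0 hy1, if_neg hcase]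
        exact hval
      · show IsRootP _ (chase (par.set px.toNat py) k' (pstep (par.set px.toNat py) y))
        rw [pstep_set par px py y hpx0 hpx1 hy0 hy1, if_neg hcase]
        exact hisr


lemma compress_chase (par : List Int) (j r : Int) (hR : InRangeL par)
    (hj0 : 0 ≤ j) (hj1 : j < (par.length : Int)) (hnr : ¬ IsRootP par j)
    (hr : IsRootP par r) (hr0 : 0 ≤ r) (hr1 : r < (par.length : Int))
    (hrj : ∀ k, IsRootP par (chase par k j) → chase par k j = r) :
    ∀ k y, 0 ≤ y → y < (par.length : Int) → IsRootP par (chase par k y) →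
      ∃ k' ≤ k, chase (par.set j.toNat r) k' y = chase par k y
        ∧ IsRootP (par.set j.toNat r) (chase (par.set j.toNat r) k' y) := by
  have hrne : r ≠ j := fun h => hnr (h ▸ hr)
  intro k
  induction k with
  | zero =>
    intro y hy0 hy1 hroot
    have hyne : y ≠ j := fun h => hnr (h ▸ hroot)
    refine ⟨0, le_refl _, rfl, ?_⟩
    show pstep (par.set j.toNat r) y = y
    rw [pstep_set par j r y hj0 hj1 hy0 hy1, if_neg hyne]
    exact hroot
  | succ k ih =>
    intro y hy0 hy1 hroot
    by_cases hcase : y = j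
    · subst hcase
      have hval : chase par (k+1) y = r := hrj (k+1) hroot
      refine ⟨1, by omega, ?_, ?_⟩
      · show chase (par.set y.toNat r) 0 (pstep (par.set y.toNat r) y) = _
        rw [pstep_set par y r y hj0 hj1 hy0 hy1, if_pos rfl, hval]
        rfl
      · show IsRootP _ (chase (par.set y.toNat r) 0 (pstep (par.set y.toNat r) y))
        rw [pstep_set par y r y hj0 hj1 hy0 hy1, if_pos rfl]
        show pstep (par.set y.toNat r) r = r
        rw [pstep_set par y r r hj0 hj1 hr0 hr1, if_neg hrne]
        exact hr
    · have hp := pstep_range par hR y hy0 hy1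
      obtain ⟨k', hk', hval, hisr⟩ := ih (pstep par y) hp.1 hp.2 hroot
      refine ⟨k' + 1, by omega, ?_, ?_⟩
      · show chase (par.set j.toNat r) k' (pstep (par.set j.toNat r) y) = _
        rw [pstep_set par j r y hj0 hj1 hy0 hy1, if_neg hcase]
        exact hval
      · show IsRootP _ (chase (par.set j.toNat r) k' (pstep (par.set j.toNat r) y))
        rw [pstep_set par j r y hj0 hj1 hy0 hy1, if_neg hcase]
        exact hisr


lemma set_link_good (par : List Int) (px py : Int) (hG : GoodP par)
    (hpx0 : 0 ≤ px) (hpx1 : px < (par.length : Int)) (hpy0 : 0 ≤ py) (hpy1 : py < (par.length : Int))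
    (hrx : IsRootP par px) (hry : IsRootP par py) (hne : px ≠ py) :
    GoodP (par.set px.toNat py) ∧
    ∀ y, 0 ≤ y → y < (par.length : Int) →
      rootP (par.set px.toNat py) y = (if rootP par y = px then py else rootP par y) := by
  have hR := hG.1
  have hlen : (par.set px.toNat py).length = par.length := by simp
  have hR' : InRangeL (par.set px.toNat py) := InRangeL_set par px py hR hpy0 hpy1
  have hrc : rcount (par.set px.toNat py) + 1 = rcount par := by
    have hb := rcount_set_balance par px py hpx0 hpx1
    rw [if_pos (by exact hrx)] at hb
    have hstep : pstep (par.set px.toNat py) px = py := by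
      rw [pstep_set par px py px hpx0 hpx1 hpx0 hpx1, if_pos rfl]
    rw [hstep, if_neg (fun h => hne h.symm)] at hb
    omega
  have hrcpos : 1 ≤ rcount par := rcount_pos par hG px hpx0 hpx1
  constructor
  · refine ⟨hR', ?_⟩
    intro x hx0 hx1
    rw [hlen] at hx1
    obtain ⟨k, hk, hkb⟩ := hG.2 x hx0 hx1
    obtain ⟨k', hk', hval, hisr⟩ := link_chase par px py hR hpx0 hpx1 hpy0 hpy1 hrx hry hne k x hx0 hx1 hk
    exact ⟨k', hisr, by rw [hlen]; omega⟩
  · intro y hy0 hy1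
    obtain ⟨k, hk, hkb⟩ := hG.2 y hy0 hy1
    obtain ⟨k', hk', hval, hisr⟩ := link_chase par px py hR hpx0 hpx1 hpy0 hpy1 hrx hry hne k y hy0 hy1 hk
    have h1 : rootP (par.set px.toNat py) y = chase (par.set px.toNat py) k' y := by
      rw [rootP, hlen]
      exact chase_stable _ k' par.length y hisr (by omega)
    rw [h1, hval, rootP_eq_chase par hG y hy0 hy1 k hk]


lemma set_compress_good (par : List Int) (j : Int) (hG : GoodP par)
    (hj0 : 0 ≤ j) (hj1 : j < (par.length : Int)) :
    GoodP (par.set j.toNat (rootP par j)) ∧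
    ∀ y, 0 ≤ y → y < (par.length : Int) →
      rootP (par.set j.toNat (rootP par j)) y = rootP par y := by
  have hR := hG.1
  have hrrange := chase_range par hR par.length j hj0 hj1
  have hrroot : IsRootP par (rootP par j) := rootP_isRoot par hG j hj0 hj1
  by_cases hjr : IsRootP par j
  · have hrj : rootP par j = j := chase_fix par par.length j hjr
    have hget : par[j.toNat]'(by omega) = j := by
      have := pstep_eq par j hj0 hj1
      rw [hjr] at this
      omega
    have hidem : par.set j.toNat (rootP par j) = par := by
      have h2 : par.set j.toNat (par[j.toNat]'(by omega)) = par := List.set_getElem_self (by omega)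
      calc par.set j.toNat (rootP par j) = par.set j.toNat (par[j.toNat]'(by omega)) := by
            rw [hrj, hget]
        _ = par := h2
    rw [hidem]
    exact ⟨hG, fun y _ _ => rfl⟩
  · have hrne : rootP par j ≠ j := fun h => hjr (h ▸ hrroot)
    have huniq : ∀ k, IsRootP par (chase par k j) → chase par k j = rootP par j :=
      fun k hk => (rootP_eq_chase par hG j hj0 hj1 k hk).symm
    have hlen : (par.set j.toNat (rootP par j)).length = par.length := by simp
    have hR' : InRangeL (par.set j.toNat (rootP par j)) :=
      InRangeL_set par j (rootP par j) hR hrrange.1 hrrange.2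
    have hrc : rcount (par.set j.toNat (rootP par j)) = rcount par := by
      have hb := rcount_set_balance par j (rootP par j) hj0 hj1
      rw [if_neg (show ¬ pstep par j = j from hjr)] at hb
      have hstep : pstep (par.set j.toNat (rootP par j)) j = rootP par j := by
        rw [pstep_set par j (rootP par j) j hj0 hj1 hj0 hj1, if_pos rfl]
      rw [hstep, if_neg hrne] at hb
      omega
    constructor
    · refine ⟨hR', ?_⟩
      intro x hx0 hx1
      rw [hlen] at hx1
      obtain ⟨k, hk, hkb⟩ := hG.2 x hx0 hx1
      obtain ⟨k', hk', hval, hisr⟩ := compress_chase par j (rootP par j) hR hj0 hj1 hjr hrroot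
        hrrange.1 hrrange.2 huniq k x hx0 hx1 hk
      exact ⟨k', hisr, by rw [hlen]; omega⟩
    · intro y hy0 hy1
      obtain ⟨k, hk, hkb⟩ := hG.2 y hy0 hy1
      obtain ⟨k', hk', hval, hisr⟩ := compress_chase par j (rootP par j) hR hj0 hj1 hjr hrroot
        hrrange.1 hrrange.2 huniq k y hy0 hy1 hk
      have h1 : rootP (par.set j.toNat (rootP par j)) y
          = chase (par.set j.toNat (rootP par j)) k' y := by
        rw [rootP, hlen]
        exact chase_stable _ k' par.length y hisr (by omega)
      rw [h1, hval, rootP_eq_chase par hG y hy0 hy1 k hk]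


lemma findA_spec (f : Nat) : ∀ (par : List Int) (x : Int), GoodP par → 0 ≤ x →
    x < (par.length : Int) → (∃ k ≤ f, IsRootP par (chase par k x)) →
    (pvFindA (f+1) par x).2 = rootP par x ∧
    (pvFindA (f+1) par x).1.length = par.length ∧
    GoodP (pvFindA (f+1) par x).1 ∧
    ∀ y, 0 ≤ y → y < (par.length : Int) →
      rootP (pvFindA (f+1) par x).1 y = rootP par y := by
  induction f with
  | zero =>
    intro par x hG h0 h1 hex
    obtain ⟨k, hk0, hk⟩ := hex
    have hk' : k = 0 := by omega
    subst hk'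
    have hroot : pstep par x = x := hk
    have hget : PySem.List.pyGet? par x = some (pstep par x) := by
      rw [pstep_eq par x h0 h1]
      exact PySem.List.pyGet?_eq_some_getElem par h0 h1
    have hrx : rootP par x = x := chase_fix par par.length x hroot
    have heq : pvFindA 1 par x = (par, x) := by
      simp only [pvFindA, hget, hroot]
      simp
    rw [heq, hrx]
    exact ⟨rfl, rfl, hG, fun y _ _ => rfl⟩
  | succ f ih =>
    intro par x hG h0 h1 hex
    have hget : PySem.List.pyGet? par x = some (pstep par x) := by
      rw [pstep_eq par x h0 h1]
      exact PySem.List.pyGet?_eq_some_getElem par h0 h1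
    by_cases hroot : pstep par x = x
    · have hrx : rootP par x = x := chase_fix par par.length x hroot
      have heq : pvFindA (f+1+1) par x = (par, x) := by
        simp only [pvFindA, hget, hroot]
        simp
      rw [heq, hrx]
      exact ⟨rfl, rfl, hG, fun y _ _ => rfl⟩
    · have hp := pstep_range par hG.1 x h0 h1
      obtain ⟨k, hk0, hk⟩ := hex
      have hkpos : k ≠ 0 := by
        intro h; subst h; exact hroot hk
      have hex' : ∃ k' ≤ f, IsRootP par (chase par k' (pstep par x)) := by
        refine ⟨k - 1, by omega, ?_⟩
        have : chase par k x = chase par (k-1) (pstep par x) := by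
          have : k = (k-1) + 1 := by omega
          rw [this]
          rfl
        rw [← this]
        exact hk
      obtain ⟨hr1, hr2, hr3, hr4⟩ := ih par (pstep par x) hG hp.1 hp.2 hex'
      have heq : pvFindA (f+1+1) par x
          = (PySem.List.pySetD (pvFindA (f+1) par (pstep par x)).1 x (pvFindA (f+1) par (pstep par x)).2,
             (pvFindA (f+1) par (pstep par x)).2) := by
        simp only [pvFindA, hget]
        rw [if_pos hroot]
      have hrxp : rootP par x = rootP par (pstep par x) := by
        have h1' : chase par k x = chase par (k-1) (pstep par x) := by
          have : k = (k-1) + 1 := by omega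
          rw [this]; rfl
        rw [rootP_eq_chase par hG x h0 h1 k hk, h1',
          ← rootP_eq_chase par hG (pstep par x) hp.1 hp.2 (k-1) (by rw [← h1']; exact hk)]
      rw [heq]
      rw [hr1]
      have hset : PySem.List.pySetD (pvFindA (f+1) par (pstep par x)).1 x (rootP par (pstep par x))
          = (pvFindA (f+1) par (pstep par x)).1.set x.toNat
              (rootP (pvFindA (f+1) par (pstep par x)).1 x) := by
        rw [PySem.List.pySetD_of_nonneg _ _ h0]
        rw [hr4 x h0 h1, hrxp]
      rw [hset]
      have hxlen : x < ((pvFindA (f+1) par (pstep par x)).1.length : Int) := by rw [hr2]; exact h1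
      obtain ⟨hg', hroots'⟩ := set_compress_good (pvFindA (f+1) par (pstep par x)).1 x hr3 h0 hxlen
      refine ⟨by rw [hrxp], ?_, hg', ?_⟩
      · simp [hr2]
      · intro y hy0 hy1
        have hy1' : y < ((pvFindA (f+1) par (pstep par x)).1.length : Int) := by rw [hr2]; exact hy1
        rw [hroots' y hy0 hy1', hr4 y hy0 hy1]


lemma findA_run (par : List Int) (x : Int) (hG : GoodP par) (h0 : 0 ≤ x)
    (h1 : x < (par.length : Int)) :
    (pvFindA (par.length + 1) par x).2 = rootP par x ∧
    (pvFindA (par.length + 1) par x).1.length = par.length ∧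
    GoodP (pvFindA (par.length + 1) par x).1 ∧
    ∀ y, 0 ≤ y → y < (par.length : Int) →
      rootP (pvFindA (par.length + 1) par x).1 y = rootP par y := by
  obtain ⟨k, hk, hkb⟩ := hG.2 x h0 h1
  exact findA_spec par.length par x hG h0 h1 ⟨k, by omega, hk⟩


lemma pySetD_neg (xs : List Int) (i : Int) (v : Int) (h0 : -(xs.length : Int) ≤ i) (h1 : i < 0) :
    PySem.List.pySetD xs i v = xs.set (i + xs.length).toNat v := by
  have : xs.length - (-i).toNat = (i + xs.length).toNat := by omega
  simp only [PySem.List.pySetD, PySem.List.pySet?, PySem.List.pyIdx?]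
  rw [if_neg (by omega), if_pos (by exact_mod_cast h0), this]
  rfl

lemma findA_neg (par : List Int) (x : Int) (hG : GoodP par) (h0 : -(par.length : Int) ≤ x)
    (h1 : x < 0) :
    pvFindA (par.length + 1) par x = pvFindA (par.length + 1) par (x + par.length) := by
  have hlen1 : 1 ≤ par.length := by
    by_contra hc
    have : par.length = 0 := by omega
    rw [this] at h0
    simp at h0
    omega
  have hx0' : 0 ≤ x + par.length := by omega
  have hx1' : x + par.length < (par.length : Int) := by omega
  have hgetpos : PySem.List.pyGet? par (x + par.length) = some (pstep par (x + par.length)) := by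
    rw [pstep_eq par (x + par.length) hx0' hx1']
    exact PySem.List.pyGet?_eq_some_getElem par hx0' hx1'
  have hgetneg : PySem.List.pyGet? par x = some (pstep par (x + par.length)) := by
    rw [PySem.List.pyGet?_neg par h1 h0]
    rw [pstep_eq par (x + par.length) hx0' hx1']
    have hidx : par.length - (-x).toNat = (x + par.length).toNat := by omega
    rw [hidx]
    exact List.getElem?_eq_getElem (by omega)
  have hprange := pstep_range par hG.1 (x + par.length) hx0' hx1'
  have hpne : pstep par (x + par.length) ≠ x := by omega
  by_cases hproot : pstep par (x + par.length) = x + par.length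
  · -- x + len is already a root: both sides return (par, x + len)
    have hinner : pvFindA par.length par (pstep par (x + par.length)) = (par, x + par.length) := by
      have hlsplit : par.length = (par.length - 1) + 1 := by omega
      have hz : PySem.List.pyGet? par (x + par.length) = some (x + par.length) := by
        rw [hgetpos, hproot]
      have hgen : pvFindA ((par.length - 1) + 1) par (x + par.length) = (par, x + par.length) := by
        simp only [pvFindA, hz]
        simp
      rw [hproot]
      rwa [← hlsplit] at hgen
    have hLHS : pvFindA (par.length + 1) par x
        = (PySem.List.pySetD par x (x + par.length), x + par.length) := by
      simp only [pvFindA, hgetneg]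
      rw [if_pos hpne, hinner]
    have hset : PySem.List.pySetD par x (x + par.length) = par := by
      rw [pySetD_neg par x _ h0 h1]
      have hg : par[(x + par.length).toNat]'(by omega) = x + par.length := by
        have := pstep_eq par (x + par.length) hx0' hx1'
        omega
      calc par.set (x + par.length).toNat (x + par.length)
          = par.set (x + par.length).toNat (par[(x + par.length).toNat]'(by omega)) := by rw [hg]
        _ = par := List.set_getElem_self (by omega)
    have hRHS : pvFindA (par.length + 1) par (x + par.length) = (par, x + par.length) := by
      simp only [pvFindA, hgetpos, hproot]
      simp
    rw [hLHS, hRHS, hset]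
  · -- genuine step on both sides; the recursive call and final assignment coincide
    have hex : ∃ k ≤ par.length - 1, IsRootP par (chase par k (pstep par (x + par.length))) := by
      obtain ⟨k, hk, hkb⟩ := hG.2 (pstep par (x + par.length)) hprange.1 hprange.2
      have := rcount_pos par hG (pstep par (x + par.length)) hprange.1 hprange.2
      exact ⟨k, by omega, hk⟩
    have hlsplit : par.length = (par.length - 1) + 1 := by omega
    have hspec := findA_spec (par.length - 1) par (pstep par (x + par.length)) hG hprange.1 hprange.2 hex
    rw [← hlsplit] at hspec
    have hLHS : pvFindA (par.length + 1) par x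
        = (PySem.List.pySetD (pvFindA par.length par (pstep par (x + par.length))).1 x
             (pvFindA par.length par (pstep par (x + par.length))).2,
           (pvFindA par.length par (pstep par (x + par.length))).2) := by
      simp only [pvFindA, hgetneg]
      rw [if_pos hpne]
    have hRHS : pvFindA (par.length + 1) par (x + par.length)
        = (PySem.List.pySetD (pvFindA par.length par (pstep par (x + par.length))).1 (x + par.length)
             (pvFindA par.length par (pstep par (x + par.length))).2,
           (pvFindA par.length par (pstep par (x + par.length))).2) := by
      simp only [pvFindA, hgetpos]
      rw [if_pos hproot]
    rw [hLHS, hRHS]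
    have hq := hspec.2.1
    have hsets : PySem.List.pySetD (pvFindA par.length par (pstep par (x + par.length))).1 x
        (pvFindA par.length par (pstep par (x + par.length))).2
        = PySem.List.pySetD (pvFindA par.length par (pstep par (x + par.length))).1 (x + par.length)
            (pvFindA par.length par (pstep par (x + par.length))).2 := by
      rw [pySetD_neg _ x _ (by rw [hq]; omega) h1,
        PySem.List.pySetD_of_nonneg _ _ hx0']
      rw [hq]
    rw [hsets]


def normI (n : Nat) (x : Int) : Int := if x < 0 then x + n else x

lemma union_spec (par : List Int) (x y : Int) (hG : GoodP par)
    (hx0 : -(par.length : Int) ≤ x) (hx1 : x < (par.length : Int))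
    (hy0 : -(par.length : Int) ≤ y) (hy1 : y < (par.length : Int)) :
    GoodP (pvUnionA par x y) ∧ (pvUnionA par x y).length = par.length ∧
    ∀ z, 0 ≤ z → z < (par.length : Int) →
      rootP (pvUnionA par x y) z =
        (if rootP par z = rootP par (normI par.length x) then rootP par (normI par.length y)
         else rootP par z) := by
  have hnx0 : 0 ≤ normI par.length x := by unfold normI; split <;> omega
  have hnx1 : normI par.length x < (par.length : Int) := by unfold normI; split <;> omega
  have hfx : pvFindA (par.length + 1) par x = pvFindA (par.length + 1) par (normI par.length x) := by
    unfold normI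
    split
    · exact findA_neg par x hG hx0 (by assumption)
    · rfl
  obtain ⟨ha1, ha2, ha3, ha4⟩ := findA_run par (normI par.length x) hG hnx0 hnx1
  rw [← hfx] at ha1 ha2 ha3 ha4
  set par1 := (pvFindA (par.length + 1) par x).1 with hpar1
  have hny0 : 0 ≤ normI par.length y := by unfold normI; split <;> omega
  have hny1 : normI par.length y < (par.length : Int) := by unfold normI; split <;> omega
  have hny1' : normI par.length y < (par1.length : Int) := by rw [ha2]; exact hny1
  have hfy : pvFindA (par1.length + 1) par1 y = pvFindA (par1.length + 1) par1 (normI par1.length y) := by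
    unfold normI
    split
    · exact findA_neg par1 y ha3 (by rw [ha2]; omega) (by assumption)
    · rfl
  have hnorm1 : normI par1.length y = normI par.length y := by rw [ha2]
  rw [hnorm1] at hfy
  obtain ⟨hb1, hb2, hb3, hb4⟩ := findA_run par1 (normI par.length y) ha3 hny0 hny1'
  rw [← hfy] at hb1 hb2 hb3 hb4
  set par2 := (pvFindA (par1.length + 1) par1 y).1 with hpar2
  have hpxv : (pvFindA (par.length + 1) par x).2 = rootP par (normI par.length x) := ha1
  have hpyv : (pvFindA (par1.length + 1) par1 y).2 = rootP par (normI par.length y) := by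
    rw [hb1, ha4 (normI par.length y) hny0 hny1]
  set px := rootP par (normI par.length x) with hpxd
  set py := rootP par (normI par.length y) with hpyd
  have hpxr : 0 ≤ px ∧ px < (par.length : Int) := chase_range par hG.1 par.length _ hnx0 hnx1
  have hpyr : 0 ≤ py ∧ py < (par.length : Int) := chase_range par hG.1 par.length _ hny0 hny1
  have hpx_root2 : IsRootP par2 px := by
    have h1' : rootP par2 px = rootP par px := by
      rw [hb4 px hpxr.1 (by rw [ha2]; exact hpxr.2), ha4 px hpxr.1 hpxr.2]
    have h2' : rootP par px = px := by
      have hr := rootP_isRoot par hG (normI par.length x) hnx0 hnx1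
      exact chase_fix par par.length px hr
    have h3' : rootP par2 px = px := by rw [h1', h2']
    have := rootP_isRoot par2 hb3 px hpxr.1 (by rw [hb2, ha2]; exact hpxr.2)
    rwa [h3'] at this
  have hpy_root2 : IsRootP par2 py := by
    have h1' : rootP par2 py = rootP par py := by
      rw [hb4 py hpyr.1 (by rw [ha2]; exact hpyr.2), ha4 py hpyr.1 hpyr.2]
    have h2' : rootP par py = py := by
      have hr := rootP_isRoot par hG (normI par.length y) hny0 hny1
      exact chase_fix par par.length py hr
    have h3' : rootP par2 py = py := by rw [h1', h2']
    have := rootP_isRoot par2 hb3 py hpyr.1 (by rw [hb2, ha2]; exact hpyr.2)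
    rwa [h3'] at this
  have hroots2 : ∀ z, 0 ≤ z → z < (par.length : Int) → rootP par2 z = rootP par z := by
    intro z hz0 hz1
    rw [hb4 z hz0 (by rw [ha2]; exact hz1), ha4 z hz0 hz1]
  have hdef : pvUnionA par x y = (if px ≠ py then PySem.List.pySetD par2 px py else par2) := by
    show (if (pvFindA (par.length + 1) par x).2 ≠ (pvFindA (par1.length + 1) par1 y).2
          then PySem.List.pySetD par2 (pvFindA (par.length + 1) par x).2
                 (pvFindA (par1.length + 1) par1 y).2
          else par2) = _
    rw [hpxv, hpyv]
  rw [hdef]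
  by_cases hne : px = py
  · rw [if_neg (by simpa using hne)]
    refine ⟨hb3, by rw [hb2, ha2], ?_⟩
    intro z hz0 hz1
    rw [hroots2 z hz0 hz1]
    split
    · rename_i hzz
      rw [hzz, hne]
    · rfl
  · rw [if_pos (by simpa using hne)]
    have hlen2 : par2.length = par.length := by rw [hb2, ha2]
    obtain ⟨hg', hroots'⟩ := set_link_good par2 px py hb3
      hpxr.1 (by rw [hlen2]; exact hpxr.2) hpyr.1 (by rw [hlen2]; exact hpyr.2)
      hpx_root2 hpy_root2 hne
    rw [PySem.List.pySetD_of_nonneg _ _ hpxr.1]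
    refine ⟨hg', by simp [hlen2], ?_⟩
    intro z hz0 hz1
    rw [hroots' z hz0 (by rw [hlen2]; exact hz1), hroots2 z hz0 hz1]


lemma lget_neg (label : List Int) (x : Int) (h0 : -(label.length : Int) ≤ x) (h1 : x < 0) :
    lget label x = lget label (x + label.length) := by
  have hlen1 : 1 ≤ label.length := by
    by_contra hc
    have : label.length = 0 := by omega
    rw [this] at h0
    simp at h0
    omega
  unfold lget PySem.List.pyGetD
  rw [PySem.List.pyGet?_neg label h1 h0]
  rw [PySem.List.pyGet?_of_nonneg _ (by omega)]
  have : label.length - (-x).toNat = (x + label.length).toNat := by omega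
  rw [this]


lemma lget_map (label : List Int) (f : Int → Int) (i : Int) (h0 : 0 ≤ i)
    (h1 : i < (label.length : Int)) : lget (label.map f) i = f (lget label i) := by
  unfold lget
  rw [PySem.List.pyGetD_eq_getElem _ 0 h0 (by simpa using h1),
    PySem.List.pyGetD_eq_getElem _ 0 h0 h1]
  simp


lemma linkInv_init (tc : Int) :
    LinkInv tc.toNat (PySem.List.pyRange 0 tc 1) (PySem.List.pyRange 0 tc 1) := by
  have hlen : (PySem.List.pyRange 0 tc 1).length = tc.toNat := by
    rw [PySem.List.length_pyRange_one]
    omega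
  have hget : ∀ i : Int, 0 ≤ i → i < (tc.toNat : Int) → pstep (PySem.List.pyRange 0 tc 1) i = i := by
    intro i h0 h1
    rw [pstep_eq _ i h0 (by rw [hlen]; exact h1)]
    rw [PySem.List.getElem_pyRange_one]
    omega
  have hroot : ∀ i : Int, 0 ≤ i → i < (tc.toNat : Int) → rootP (PySem.List.pyRange 0 tc 1) i = i := by
    intro i h0 h1
    exact chase_fix _ _ i (hget i h0 h1)
  have hR : InRangeL (PySem.List.pyRange 0 tc 1) := by
    intro p hp
    rw [PySem.List.mem_pyRange_one] at hp
    rw [hlen]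
    omega
  have hrc : rcount (PySem.List.pyRange 0 tc 1) = tc.toNat := by
    rw [rcount, hlen]
    have hone : ∀ i ∈ Finset.range tc.toNat,
        (if pstep (PySem.List.pyRange 0 tc 1) (i : Int) = (i : Int) then 1 else 0) = 1 := by
      intro i hi
      rw [Finset.mem_range] at hi
      rw [if_pos (hget (i : Int) (by positivity) (by exact_mod_cast hi))]
    rw [Finset.sum_congr rfl hone, Finset.sum_const, smul_eq_mul, mul_one, Finset.card_range]
  refine ⟨hlen, hlen, ⟨hR, ?_⟩, ?_⟩
  · intro x h0 h1
    rw [hlen] at h1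
    exact ⟨0, hget x h0 h1, by rw [hlen, hrc]; omega⟩
  · intro i j hi0 hi1 hj0 hj1
    rw [hroot i hi0 hi1, hroot j hj0 hj1]
    unfold lget
    rw [PySem.List.pyGetD_eq_getElem _ 0 hi0 (by rw [hlen]; exact hi1),
      PySem.List.pyGetD_eq_getElem _ 0 hj0 (by rw [hlen]; exact hj1)]
    rw [PySem.List.getElem_pyRange_one, PySem.List.getElem_pyRange_one]
    constructor <;> intro h <;> omega


lemma inner_step (n : Nat) (par label : List Int) (g0 x : Int) (hL : LinkInv n par label)
    (hg0 : -(n : Int) ≤ g0 ∧ g0 < (n : Int)) (hx : -(n : Int) ≤ x ∧ x < (n : Int)) :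
    LinkInv n (pvUnionA par g0 x)
      (if lget label g0 ≠ lget label x
       then label.map (fun l => if l = lget label g0 then lget label x else l) else label) := by
  obtain ⟨hpl, hll, hGp, hiff⟩ := hL
  have hn1 : 1 ≤ (n : Int) := by omega
  have hx0' : -(par.length : Int) ≤ x := by rw [hpl]; exact hx.1
  have hx1' : x < (par.length : Int) := by rw [hpl]; exact hx.2
  have hg0' : -(par.length : Int) ≤ g0 := by rw [hpl]; exact hg0.1
  have hg1' : g0 < (par.length : Int) := by rw [hpl]; exact hg0.2
  obtain ⟨hU1, hU2, hU3⟩ := union_spec par g0 x hGp hg0' hg1' hx0' hx1'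
  have hnormg : normI par.length g0 = normI n g0 := by rw [hpl]
  have hnormx : normI par.length x = normI n x := by rw [hpl]
  rw [hnormg, hnormx] at hU3
  have hng0 : 0 ≤ normI n g0 ∧ normI n g0 < (n : Int) := by unfold normI; split <;> omega
  have hnx : 0 ≤ normI n x ∧ normI n x < (n : Int) := by unfold normI; split <;> omega
  have ha : lget label g0 = lget label (normI n g0) := by
    unfold normI
    split
    · rw [lget_neg label g0 (by rw [hll]; exact hg0.1) (by assumption), hll]
    · rfl
  have hb : lget label x = lget label (normI n x) := by
    unfold normI
    split
    · rw [lget_neg label x (by rw [hll]; exact hx.1) (by assumption), hll]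
    · rfl
  rw [hpl] at hU2
  by_cases hab : lget label g0 = lget label x
  · rw [if_neg (by simpa using hab)]
    have hreq : rootP par (normI n g0) = rootP par (normI n x) := by
      rw [hiff _ _ hng0.1 hng0.2 hnx.1 hnx.2, ← ha, ← hb]
      exact hab
    have hU3' : ∀ z, 0 ≤ z → z < (n : Int) → rootP (pvUnionA par g0 x) z = rootP par z := by
      intro z hz0 hz1
      rw [hU3 z hz0 (by omega)]
      split
      · rename_i hzz
        rw [hzz, hreq]
      · rfl
    refine ⟨by omega, hll, hU1, ?_⟩
    intro i j hi0 hi1 hj0 hj1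
    rw [hU3' i hi0 hi1, hU3' j hj0 hj1]
    exact hiff i j hi0 hi1 hj0 hj1
  · rw [if_pos (by simpa using hab)]
    refine ⟨by omega, by simpa using hll, hU1, ?_⟩
    intro i j hi0 hi1 hj0 hj1
    have hi1l : i < (label.length : Int) := by rw [hll]; exact hi1
    have hj1l : j < (label.length : Int) := by rw [hll]; exact hj1
    rw [lget_map label _ i hi0 hi1l, lget_map label _ j hj0 hj1l]
    rw [hU3 i hi0 (by omega), hU3 j hj0 (by omega)]
    have fi1 : rootP par i = rootP par (normI n g0) ↔ lget label i = lget label g0 := by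
      rw [hiff _ _ hi0 hi1 hng0.1 hng0.2, ha]
    have fi2 : rootP par i = rootP par (normI n x) ↔ lget label i = lget label x := by
      rw [hiff _ _ hi0 hi1 hnx.1 hnx.2, hb]
    have fj1 : rootP par j = rootP par (normI n g0) ↔ lget label j = lget label g0 := by
      rw [hiff _ _ hj0 hj1 hng0.1 hng0.2, ha]
    have fj2 : rootP par j = rootP par (normI n x) ↔ lget label j = lget label x := by
      rw [hiff _ _ hj0 hj1 hnx.1 hnx.2, hb]
    have fij : rootP par i = rootP par j ↔ lget label i = lget label j :=
      hiff i j hi0 hi1 hj0 hj1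
    by_cases h1 : rootP par i = rootP par (normI n g0) <;>
      by_cases h2 : rootP par j = rootP par (normI n g0)
    · rw [if_pos h1, if_pos h2, if_pos (fi1.mp h1), if_pos (fj1.mp h2)]
      simp
    · rw [if_pos h1, if_neg h2, if_pos (fi1.mp h1), if_neg (fun hc => h2 (fj1.mpr hc))]
      constructor
      · intro h
        exact (fj2.mp h.symm).symm
      · intro h
        exact (fj2.mpr h.symm).symm
    · rw [if_neg h1, if_pos h2, if_neg (fun hc => h1 (fi1.mpr hc)), if_pos (fj1.mp h2)]
      constructor
      · intro h
        exact fi2.mp h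
      · intro h
        exact fi2.mpr h
    · rw [if_neg h1, if_neg h2, if_neg (fun hc => h1 (fi1.mpr hc)), if_neg (fun hc => h2 (fj1.mpr hc))]
      exact fij


lemma inner_fold (n : Nat) (g0 : Int) (hg0 : -(n : Int) ≤ g0 ∧ g0 < (n : Int)) :
    ∀ (l : List Int) (par label : List Int), (∀ x ∈ l, -(n : Int) ≤ x ∧ x < (n : Int)) →
    LinkInv n par label →
    LinkInv n (l.foldl (fun par x => pvUnionA par g0 x) par)
      (l.foldl (fun label x =>
        let a := lget label g0
        let b := lget label x
        if a ≠ b then label.map (fun l => if l = a then b else l) else label) label) := by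
  intro l
  induction l with
  | nil => intro par label _ hL; exact hL
  | cons x t ih =>
    intro par label hb hL
    exact ih _ _ (fun z hz => hb z (List.mem_cons_of_mem _ hz))
      (inner_step n par label g0 x hL hg0 (hb x (List.mem_cons_self)))


lemma group_step (n : Nat) (par label : List Int) (g : List Int) (hL : LinkInv n par label)
    (hg : 1 < g.length → ∀ x ∈ g, -(n : Int) ≤ x ∧ x < (n : Int)) :
    LinkInv n (pvGroupStepA par g) (pvRelabelStepB label g) := by
  by_cases hg1 : 1 < g.length
  · have hlen : (1 : Int) < PySem.List.len g := by
      rw [PySem.List.len_eq]; exact_mod_cast hg1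
    have hbounds := hg hg1
    have hg0mem : PySem.List.pyGetD g 0 0 ∈ g := by
      apply PySem.List.pyGetD_mem
      simp [PySem.Raise.InRange]
      omega
    have hA : pvGroupStepA par g
        = (g.drop 1).foldl (fun par x => pvUnionA par (PySem.List.pyGetD g 0 0) x) par := by
      unfold pvGroupStepA
      rw [if_pos hlen]
      have := PySem.List.foldl_pyRange_pyGetD g (0 : Int)
        (fun par x => pvUnionA par (PySem.List.pyGetD g 0 0) x) par (a := 1) (by omega)
      simpa using this
    have hB : pvRelabelStepB label g
        = (g.drop 1).foldl (fun label x =>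
            let a := lget label (PySem.List.pyGetD g 0 0)
            let b := lget label x
            if a ≠ b then label.map (fun l => if l = a then b else l) else label) label := by
      unfold pvRelabelStepB
      rw [if_pos hlen, PySem.List.slice_from_one, ← List.drop_one]
      rfl
    rw [hA, hB]
    exact inner_fold n (PySem.List.pyGetD g 0 0) (hbounds _ hg0mem) (g.drop 1) par label
      (fun x hx => hbounds x (List.mem_of_mem_drop hx)) hL
  · have hlen : ¬ ((1 : Int) < PySem.List.len g) := by
      rw [PySem.List.len_eq]; exact_mod_cast hg1
    unfold pvGroupStepA pvRelabelStepB
    rw [if_neg hlen, if_neg hlen]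
    exact hL


lemma groups_fold (n : Nat) : ∀ (gs : List (List Int)) (par label : List Int),
    (∀ g ∈ gs, 1 < g.length → ∀ x ∈ g, -(n : Int) ≤ x ∧ x < (n : Int)) →
    LinkInv n par label →
    LinkInv n (gs.foldl pvGroupStepA par) (gs.foldl pvRelabelStepB label) := by
  intro gs
  induction gs with
  | nil => intro par label _ hL; exact hL
  | cons g t ih =>
    intro par label hb hL
    exact ih _ _ (fun z hz => hb z (List.mem_cons_of_mem _ hz))
      (group_step n par label g hL (hb g (List.mem_cons_self)))


lemma collectA_fold (n : Nat) (par0 : List Int) :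
    ∀ (l : List Int) (d : PySem.Dict Int (List Int)) (par : List Int),
    GoodP par → par.length = n → (∀ z, 0 ≤ z → z < (n : Int) → rootP par z = rootP par0 z) →
    (∀ i ∈ l, 0 ≤ i ∧ i < (n : Int)) →
    (l.foldl pvCollectStepA (d, par)).1 = l.foldl (gstep (fun z => rootP par0 z)) d := by
  intro l
  induction l with
  | nil => intro d par _ _ _ _; rfl
  | cons i t ih =>
    intro d par hGp hlen hroots hb
    have hi := hb i (List.mem_cons_self)
    have hi1 : i < (par.length : Int) := by rw [hlen]; exact hi.2
    obtain ⟨hf1, hf2, hf3, hf4⟩ := findA_run par i hGp hi.1 hi1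
    have hstep : pvCollectStepA (d, par) i
        = (gstep (fun z => rootP par0 z) d i, (pvFindA (par.length + 1) par i).1) := by
      show ((if d.contains (pvFindA (par.length + 1) par i).2 then d
             else d.insert (pvFindA (par.length + 1) par i).2 []).modify
              (pvFindA (par.length + 1) par i).2 [] (· ++ [i]),
            (pvFindA (par.length + 1) par i).1) = _
      rw [hf1, hroots i hi.1 hi.2]
      rfl
    rw [List.foldl_cons, hstep]
    exact ih _ _ hf3 (by rw [hf2, hlen]) (fun z hz0 hz1 => by
        rw [hf4 z hz0 (by rw [hlen]; exact hz1), hroots z hz0 hz1])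
      (fun z hz => hb z (List.mem_cons_of_mem _ hz))


lemma collectB_fold (f : PySem.Dict Int (List Int) → Int × Int → PySem.Dict Int (List Int)) :
    ∀ (lab : List Int) (s : Int) (d : PySem.Dict Int (List Int)),
    (PySem.List.enumerate lab s).foldl f d
      = (PySem.List.pyRange s (s + lab.length) 1).foldl
          (fun d i => f d (i, PySem.List.pyGetD lab (i - s) 0)) d := by
  intro lab
  induction lab with
  | nil =>
    intro s d
    rw [PySem.List.pyRange_one_eq_nil (by simp)]
    rfl
  | cons x t ih =>
    intro s d
    rw [PySem.List.enumerate_cons, List.foldl_cons, ih (s+1)]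
    have hcons : PySem.List.pyRange s (s + ((x :: t).length : Nat)) 1
        = s :: PySem.List.pyRange (s+1) (s + ((x :: t).length : Nat)) 1 :=
      PySem.List.pyRange_one_cons (by push_cast [List.length_cons]; omega)
    rw [hcons, List.foldl_cons]
    have harg : f d (s, PySem.List.pyGetD (x :: t) (s - s) 0) = f d (s, x) := by
      rw [sub_self, PySem.List.pyGetD_zero_cons]
    rw [harg]
    have hrange : PySem.List.pyRange (s + 1) (s + 1 + (t.length : Nat)) 1
        = PySem.List.pyRange (s+1) (s + ((x :: t).length : Nat)) 1 := by
      congr 1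
      simp
      omega
    rw [← hrange]
    apply PySem.List.foldl_congr_mem
    intro acc i hi
    rw [PySem.List.mem_pyRange_one] at hi
    have h1 : i - (s+1) = (i - s) - 1 := by omega
    have h2 : PySem.List.pyGetD t (i - (s+1)) 0 = PySem.List.pyGetD (x :: t) (i - s) 0 := by
      simp only [PySem.List.pyGetD]
      rw [show i - (s+1) = ((i - (s+1)).toNat : Int) by omega,
        show i - s = ((i - (s+1)).toNat : Int) + 1 by omega,
        PySem.List.pyGet?_cons_succ]
    rw [h2]


lemma setdefault_modify_eq_gstep (label : List Int) (d : PySem.Dict Int (List Int)) (i : Int) :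
    ((d.setdefault (lget label i) []).modify (lget label i) [] (· ++ [i]))
      = gstep (fun z => lget label z) d i := by
  unfold gstep
  by_cases hc : d.contains (lget label i)
  · rw [PySem.Dict.setdefault_of_contains d _ hc, if_pos hc]
  · rw [PySem.Dict.setdefault_of_not_contains d _ (by simpa using hc), if_neg hc]


lemma classMem_congr (k1 : Int → Int) (m : Nat) {r r' : Int} (h : k1 r = k1 r') :
    classMem k1 m r = classMem k1 m r' := by
  unfold classMem
  apply List.filter_congr
  intro j _
  rw [h]

lemma classMem_succ (k1 : Int → Int) (m : Nat) (r : Int) :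
    classMem k1 (m+1) r
      = classMem k1 m r ++ (if k1 (m : Int) = k1 r then [(m : Int)] else []) := by
  unfold classMem
  rw [show ((m+1 : Nat) : Int) = (m : Int) + 1 by push_cast; ring]
  rw [PySem.List.pyRange_one_succ_right (by positivity), List.filter_append]
  congr 1
  by_cases h : k1 (m : Int) = k1 r
  · rw [if_pos h]
    have hb : (k1 (m : Int) == k1 r) = true := by simpa using h
    simp [List.filter, hb]
  · rw [if_neg h]
    have hb : (k1 (m : Int) == k1 r) = false := by simpa using h
    simp [List.filter, hb]

lemma classMem_fresh (k1 : Int → Int) (m : Nat) (r : Int)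
    (h : ∀ j : Int, 0 ≤ j → j < (m : Int) → k1 j ≠ k1 r) : classMem k1 m r = [] := by
  unfold classMem
  rw [List.filter_eq_nil_iff]
  intro j hj
  rw [PySem.List.mem_pyRange_one] at hj
  simpa using h j hj.1 hj.2

lemma ginv_step (k1 k2 : Int → Int) (n m : Nat) (hmn : m < n)
    (hpart : ∀ i j : Int, 0 ≤ i → i < (n : Int) → 0 ≤ j → j < (n : Int) → (k1 i = k1 j ↔ k2 i = k2 j))
    (d1 d2 : PySem.Dict Int (List Int)) (reps : List Int) (h : GInv k1 k2 m d1 d2 reps) :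
    ∃ reps', GInv k1 k2 (m+1) (gstep k1 d1 (m : Int)) (gstep k2 d2 (m : Int)) reps' := by
  obtain ⟨hbnd, hnd1, hnd2, hcomp, hit1, hit2⟩ := h
  have hkeys1 : d1.keys = reps.map k1 := by
    simp only [PySem.Dict.keys, hit1, List.map_map]
    rfl
  have hkeys2 : d2.keys = reps.map k2 := by
    simp only [PySem.Dict.keys, hit2, List.map_map]
    rfl
  have hm0 : (0 : Int) ≤ (m : Int) := by positivity
  have hm1 : (m : Int) < (n : Int) := by exact_mod_cast hmn
  by_cases hseen : ∃ r ∈ reps, k1 r = k1 (m : Int)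
  · obtain ⟨r0, hr0mem, hr0k⟩ := hseen
    have hr0b := hbnd r0 hr0mem
    have hr0k2 : k2 r0 = k2 (m : Int) :=
      (hpart r0 (m : Int) hr0b.1 (by omega) hm0 hm1).mp hr0k
    have hc1 : d1.contains (k1 (m : Int)) = true := by
      rw [PySem.Dict.contains_eq_decide_mem_keys, hkeys1]
      simp only [decide_eq_true_eq, List.mem_map]
      exact ⟨r0, hr0mem, hr0k⟩
    have hc2 : d2.contains (k2 (m : Int)) = true := by
      rw [PySem.Dict.contains_eq_decide_mem_keys, hkeys2]
      simp only [decide_eq_true_eq, List.mem_map]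
      exact ⟨r0, hr0mem, hr0k2⟩
    have hget1 : d1.getD (k1 (m : Int)) [] = classMem k1 m r0 := by
      apply PySem.Dict.getD_of_mem_items
      · rw [hit1, ← hr0k]
        exact List.mem_map_of_mem hr0mem
      · rw [hkeys1]; exact hnd1
    have hget2 : d2.getD (k2 (m : Int)) [] = classMem k1 m r0 := by
      apply PySem.Dict.getD_of_mem_items
      · rw [hit2, ← hr0k2]
        exact List.mem_map_of_mem hr0mem
      · rw [hkeys2]; exact hnd2
    have hstep1 : gstep k1 d1 (m : Int) = d1.insert (k1 (m : Int)) (classMem k1 m r0 ++ [(m : Int)]) := by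
      unfold gstep
      rw [if_pos hc1]
      show d1.insert _ ((d1.getD _ []) ++ [(m : Int)]) = _
      rw [hget1]
    have hstep2 : gstep k2 d2 (m : Int) = d2.insert (k2 (m : Int)) (classMem k1 m r0 ++ [(m : Int)]) := by
      unfold gstep
      rw [if_pos hc2]
      show d2.insert _ ((d2.getD _ []) ++ [(m : Int)]) = _
      rw [hget2]
    have hitems1 : (gstep k1 d1 (m : Int)).items
        = reps.map (fun r => (k1 r, classMem k1 (m+1) r)) := by
      rw [hstep1, PySem.Dict.items_insert_of_contains _ _ hc1, hit1, List.map_map]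
      apply List.map_congr_left
      intro r hr
      show (if k1 r == k1 (m : Int) then _ else _) = _
      by_cases hrk : k1 r = k1 (m : Int)
      · rw [if_pos (by simpa using hrk)]
        have hcc : classMem k1 m r0 = classMem k1 m r :=
          classMem_congr k1 m (by rw [hr0k, ← hrk])
        rw [classMem_succ, if_pos hrk.symm, hcc, hrk]
      · rw [if_neg (by simpa using hrk)]
        rw [classMem_succ, if_neg (fun hc => hrk hc.symm), List.append_nil]
    have hitems2 : (gstep k2 d2 (m : Int)).items
        = reps.map (fun r => (k2 r, classMem k1 (m+1) r)) := by
      rw [hstep2, PySem.Dict.items_insert_of_contains _ _ hc2, hit2, List.map_map]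
      apply List.map_congr_left
      intro r hr
      show (if k2 r == k2 (m : Int) then _ else _) = _
      have hrb := hbnd r hr
      have hiff : k2 r = k2 (m : Int) ↔ k1 r = k1 (m : Int) :=
        (hpart r (m : Int) hrb.1 (by omega) hm0 hm1).symm
      by_cases hrk : k1 r = k1 (m : Int)
      · rw [if_pos (by simpa using hiff.mpr hrk)]
        have hcc : classMem k1 m r0 = classMem k1 m r :=
          classMem_congr k1 m (by rw [hr0k, ← hrk])
        rw [classMem_succ, if_pos hrk.symm, hcc, hiff.mpr hrk]
      · rw [if_neg (by simpa using fun hc => hrk (hiff.mp hc))]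
        rw [classMem_succ, if_neg (fun hc => hrk hc.symm), List.append_nil]
    refine ⟨reps, fun r hr => ⟨(hbnd r hr).1, by have := (hbnd r hr).2; push_cast; omega⟩,
      hnd1, hnd2, ?_, hitems1, hitems2⟩
    intro j hj0 hj1
    by_cases hjm : j < (m : Int)
    · exact hcomp j hj0 hjm
    · have hjeq : j = (m : Int) := by push_cast at hj1; omega
      exact ⟨r0, hr0mem, by rw [hjeq, hr0k]⟩
  · have hfresh1 : ∀ r ∈ reps, k1 r ≠ k1 (m : Int) := fun r hr hc => hseen ⟨r, hr, hc⟩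
    have hfresh2 : ∀ r ∈ reps, k2 r ≠ k2 (m : Int) := by
      intro r hr hc
      have hrb := hbnd r hr
      exact hfresh1 r hr ((hpart r (m : Int) hrb.1 (by omega) hm0 hm1).mpr hc)
    have hc1 : d1.contains (k1 (m : Int)) = false := by
      rw [PySem.Dict.contains_eq_decide_mem_keys, hkeys1]
      simp only [decide_eq_false_iff_not, List.mem_map, not_exists]
      rintro r ⟨hr, hk⟩
      exact hfresh1 r hr hk
    have hc2 : d2.contains (k2 (m : Int)) = false := by
      rw [PySem.Dict.contains_eq_decide_mem_keys, hkeys2]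
      simp only [decide_eq_false_iff_not, List.mem_map, not_exists]
      rintro r ⟨hr, hk⟩
      exact hfresh2 r hr hk
    have hstep1 : gstep k1 d1 (m : Int) = d1.insert (k1 (m : Int)) [(m : Int)] := by
      unfold gstep
      rw [if_neg (by rw [hc1]; exact Bool.false_ne_true)]
      show (d1.insert _ []).insert _ (((d1.insert (k1 (m : Int)) []).getD (k1 (m : Int)) []) ++ [(m : Int)]) = _
      rw [PySem.Dict.getD_insert_self, PySem.Dict.insert_insert_self, List.nil_append]
    have hstep2 : gstep k2 d2 (m : Int) = d2.insert (k2 (m : Int)) [(m : Int)] := by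
      unfold gstep
      rw [if_neg (by rw [hc2]; exact Bool.false_ne_true)]
      show (d2.insert _ []).insert _ (((d2.insert (k2 (m : Int)) []).getD (k2 (m : Int)) []) ++ [(m : Int)]) = _
      rw [PySem.Dict.getD_insert_self, PySem.Dict.insert_insert_self, List.nil_append]
    have hnomatch : ∀ j : Int, 0 ≤ j → j < (m : Int) → k1 j ≠ k1 (m : Int) := by
      intro j hj0 hj1 hc
      obtain ⟨r, hr, hk⟩ := hcomp j hj0 hj1
      exact hfresh1 r hr (by rw [hk, hc])
    have hcm : classMem k1 (m+1) (m : Int) = [(m : Int)] := by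
      rw [classMem_succ, if_pos rfl, classMem_fresh k1 m (m : Int) hnomatch, List.nil_append]
    have hitems1 : (gstep k1 d1 (m : Int)).items
        = (reps ++ [(m : Int)]).map (fun r => (k1 r, classMem k1 (m+1) r)) := by
      rw [hstep1, PySem.Dict.items_insert_of_not_contains _ _ hc1, hit1, List.map_append]
      congr 1
      · apply List.map_congr_left
        intro r hr
        rw [classMem_succ, if_neg (fun hc => hfresh1 r hr hc.symm), List.append_nil]
      · rw [List.map_cons, List.map_nil, hcm]
    have hitems2 : (gstep k2 d2 (m : Int)).items
        = (reps ++ [(m : Int)]).map (fun r => (k2 r, classMem k1 (m+1) r)) := by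
      rw [hstep2, PySem.Dict.items_insert_of_not_contains _ _ hc2, hit2, List.map_append]
      congr 1
      · apply List.map_congr_left
        intro r hr
        rw [classMem_succ, if_neg (fun hc => hfresh1 r hr hc.symm), List.append_nil]
      · rw [List.map_cons, List.map_nil, hcm]
    refine ⟨reps ++ [(m : Int)], ?_, ?_, ?_, ?_, hitems1, hitems2⟩
    · intro r hr
      rcases List.mem_append.mp hr with h | h
      · exact ⟨(hbnd r h).1, by have := (hbnd r h).2; push_cast; omega⟩
      · simp at h
        subst h
        constructor
        · positivity
        · push_cast; omega
    · rw [List.map_append, List.nodup_append]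
      refine ⟨hnd1, by simp, ?_⟩
      intro a ha b hbm
      rw [List.map_cons, List.map_nil, List.mem_singleton] at hbm
      obtain ⟨r, hr, hk⟩ := List.mem_map.mp ha
      rw [hbm, ← hk]
      exact hfresh1 r hr
    · rw [List.map_append, List.nodup_append]
      refine ⟨hnd2, by simp, ?_⟩
      intro a ha b hbm
      rw [List.map_cons, List.map_nil, List.mem_singleton] at hbm
      obtain ⟨r, hr, hk⟩ := List.mem_map.mp ha
      rw [hbm, ← hk]
      exact hfresh2 r hr
    · intro j hj0 hj1
      by_cases hjm : j < (m : Int)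
      · obtain ⟨r, hr, hk⟩ := hcomp j hj0 hjm
        exact ⟨r, List.mem_append_left _ hr, hk⟩
      · have hjeq : j = (m : Int) := by push_cast at hj1; omega
        exact ⟨(m : Int), List.mem_append_right _ (List.mem_singleton.mpr rfl), by rw [hjeq]⟩


lemma grouping_eq (k1 k2 : Int → Int) (n : Nat)
    (hpart : ∀ i j : Int, 0 ≤ i → i < (n : Int) → 0 ≤ j → j < (n : Int) → (k1 i = k1 j ↔ k2 i = k2 j)) :
    (((PySem.List.pyRange 0 (n : Int) 1).foldl (gstep k1) PySem.Dict.empty).values)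
      = (((PySem.List.pyRange 0 (n : Int) 1).foldl (gstep k2) PySem.Dict.empty).values) := by
  have main : ∀ m : Nat, m ≤ n → ∃ reps, GInv k1 k2 m
      ((PySem.List.pyRange 0 (m : Int) 1).foldl (gstep k1) PySem.Dict.empty)
      ((PySem.List.pyRange 0 (m : Int) 1).foldl (gstep k2) PySem.Dict.empty) reps := by
    intro m
    induction m with
    | zero =>
      intro _
      refine ⟨[], fun r hr => absurd hr (by simp), by simp, by simp,
        fun j h0 h1 => absurd (by omega : (0:Int) < 0) (lt_irrefl 0), ?_, ?_⟩ <;>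
        · rw [PySem.List.pyRange_one_eq_nil (by simp)]
          rfl
    | succ m ih =>
      intro hle
      obtain ⟨reps, hGI⟩ := ih (by omega)
      obtain ⟨reps', hGI'⟩ := ginv_step k1 k2 n m (by omega) hpart _ _ reps hGI
      refine ⟨reps', ?_⟩
      rw [show ((m+1 : Nat) : Int) = (m : Int) + 1 by push_cast; ring,
        PySem.List.pyRange_one_succ_right (by positivity),
        List.foldl_append, List.foldl_append]
      simpa using hGI'
  obtain ⟨reps, h⟩ := main n (le_refl n)
  obtain ⟨_, _, _, _, hit1, hit2⟩ := h
  simp only [PySem.Dict.values, hit1, hit2, List.map_map]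
  rfl


lemma pyRange_toNat (tc : Int) : PySem.List.pyRange 0 tc 1 = PySem.List.pyRange 0 (tc.toNat : Int) 1 := by
  by_cases h : 0 ≤ tc
  · congr 1
    omega
  · rw [PySem.List.pyRange_one_eq_nil (by omega), PySem.List.pyRange_one_eq_nil (by omega)]



lemma final_assembly (groups : List (List Int)) (tc : Int)
    (hpre : Pre_reconcile_merge_groups_py groups tc) :
    reconcile_merge_groups_py groups tc = reconcile_merge_groups_py_alt groups tc := by
  have hb : ∀ g ∈ groups, 1 < g.length → ∀ x ∈ g, -(tc.toNat : Int) ≤ x ∧ x < (tc.toNat : Int) := by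
    intro g hg hlen x hx
    have := hpre g hg hlen x hx
    omega
  obtain ⟨hplen, hllen, hGf, hiff⟩ :=
    groups_fold tc.toNat groups _ _ hb (linkInv_init tc)
  have hA : reconcile_merge_groups_py groups tc
      = ((PySem.List.pyRange 0 tc 1).foldl
          (gstep (fun z => rootP (groups.foldl pvGroupStepA (PySem.List.pyRange 0 tc 1)) z))
          PySem.Dict.empty).values := by
    show ((PySem.List.pyRange 0 tc 1).foldl pvCollectStepA
        (PySem.Dict.empty, groups.foldl pvGroupStepA (PySem.List.pyRange 0 tc 1))).1.values = _
    congr 1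
    apply collectA_fold tc.toNat (groups.foldl pvGroupStepA (PySem.List.pyRange 0 tc 1))
      (PySem.List.pyRange 0 tc 1) PySem.Dict.empty _ hGf hplen (fun z _ _ => rfl)
    intro i hi
    rw [PySem.List.mem_pyRange_one] at hi
    constructor
    · exact hi.1
    · omega
  have hB : reconcile_merge_groups_py_alt groups tc
      = ((PySem.List.pyRange 0 (tc.toNat : Int) 1).foldl
          (gstep (fun z => lget (groups.foldl pvRelabelStepB (PySem.List.pyRange 0 tc 1)) z))
          PySem.Dict.empty).values := by
    show ((PySem.List.enumerate (groups.foldl pvRelabelStepB (PySem.List.pyRange 0 tc 1)) 0).foldl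
        (fun (d : PySem.Dict Int (List Int)) (p : Int × Int) =>
          (d.setdefault p.2 []).modify p.2 [] (· ++ [p.1])) PySem.Dict.empty).values = _
    congr 1
    rw [collectB_fold _ _ 0 PySem.Dict.empty]
    have hrange : PySem.List.pyRange 0
        (0 + ((groups.foldl pvRelabelStepB (PySem.List.pyRange 0 tc 1)).length : Int)) 1
        = PySem.List.pyRange 0 (tc.toNat : Int) 1 := by
      rw [hllen, zero_add]
    rw [hrange]
    apply PySem.List.foldl_congr_mem
    intro acc i _
    rw [show i - 0 = i from sub_zero i]
    exact setdefault_modify_eq_gstep _ acc i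
  rw [hA, hB, pyRange_toNat tc]
  apply grouping_eq _ _ tc.toNat
  rw [pyRange_toNat tc] at hiff
  intro i j hi0 hi1 hj0 hj1
  constructor
  · intro h
    exact (hiff i j hi0 hi1 hj0 hj1).mp h
  · intro h
    exact (hiff i j hi0 hi1 hj0 hj1).mpr h

-- ===== VERDICT (by name: the statement is the Claim_ definition above) =====
theorem reconcile_merge_groups_py_spec : Claim_equal_reconcile_merge_groups_py := by
  intro groups tc _hdom hpre
  exact final_assembly groups tc hpre
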